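-- pv_equiv track=rewrite | github.com/godofhavoc/AlgoPractice | test2.py | newMember
-- ===== SOURCE A (Python) =====
-- def newMember(existingNames, newName):
--     variations = []
--
--     for name in existingNames:
--         if newName in name:
--             variations.append(newName)
--
--     counter = 1
--     for name in sorted(variations):
--         if name == newName:
--             newName += str(counter)
--             counter += 1
--
--     return newName
-- ===== SOURCE B (Python) =====
-- def newMember(existingNames, newName):
--     for name in existingNames:
--         if newName in name:
--             return newName + '1'
--     return newName
-- ===== Notes on version B (the rewrite author's own statement) =====
-- stated objective: simpler
-- what changed: B is a single early-exit scan returning newName+'1' on the first existing name containing newName, replacing A's build-a-list, sort, and counter loop (which can only ever append once since newName mutates after the first match).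
import Mathlib
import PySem

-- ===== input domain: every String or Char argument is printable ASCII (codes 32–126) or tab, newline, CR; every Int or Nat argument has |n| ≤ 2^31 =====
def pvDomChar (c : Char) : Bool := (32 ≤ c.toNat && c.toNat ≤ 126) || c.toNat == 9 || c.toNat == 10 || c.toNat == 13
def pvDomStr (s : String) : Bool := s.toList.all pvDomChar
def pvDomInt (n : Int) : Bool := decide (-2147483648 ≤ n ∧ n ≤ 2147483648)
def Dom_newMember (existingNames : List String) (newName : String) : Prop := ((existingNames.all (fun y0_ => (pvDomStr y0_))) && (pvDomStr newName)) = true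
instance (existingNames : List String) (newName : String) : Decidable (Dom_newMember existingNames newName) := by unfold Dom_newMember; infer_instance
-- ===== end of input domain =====

-- B is a single early-exit scan (first match returns newName+'1'); same return value as A, no list/sort/counter.

-- ===== PORT A =====
def newMember (existingNames : List String) (newName : String) : String :=
  let variations : List String :=
    existingNames.foldl
      (fun acc name => if PySem.Str.isIn newName name then acc ++ [newName] else acc) []
  let st :=
    (PySem.List.sorted variations (fun x => x) false).foldl
      (fun st name =>
        if name == st.1 then (st.1 ++ PySem.Int.toStr st.2, st.2 + 1) else st)
      (newName, (1 : Int))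
  st.1

-- ===== PORT B =====
def newMember_alt (existingNames : List String) (newName : String) : String :=
  match existingNames with
  | [] => newName
  | name :: rest =>
    if PySem.Str.isIn newName name then newName ++ "1" else newMember_alt rest newName

-- ===== PRECONDITION & SPEC =====
def Spec_newMember (existingNames : List String) (newName : String) (out : String) : Prop := out = newMember_alt existingNames newName
instance (existingNames : List String) (newName : String) (out : String) : Decidable (Spec_newMember existingNames newName out) := by unfold Spec_newMember; infer_instance

-- ===== CLAIM (what is proved, stated in full; the proofs are below) =====
def Claim_equal_newMember : Prop := ∀ (existingNames : List String) (newName : String), Dom_newMember existingNames newName → Spec_newMember existingNames newName (newMember existingNames newName)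

-- ===== LEMMAS AND PROOFS =====

theorem append_one_ne (s : String) : s ++ "1" ≠ s := by
  intro h
  have := congrArg String.length h
  simp at this

-- once the accumulated name differs from newName, the counter loop never fires again
theorem foldl_stuck (newName : String) (l : List String)
    (h : ∀ x ∈ l, x = newName) (nm : String) (c : Int) (hnm : nm ≠ newName) :
    (l.foldl
      (fun st name =>
        if name == st.1 then (st.1 ++ PySem.Int.toStr st.2, st.2 + 1) else st)
      (nm, c)) = (nm, c) := by
  induction l with
  | nil => rfl
  | cons a t ih =>
    have ha : a = newName := h a (by simp)
    have : (a == nm) = false := by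
      simp [ha]
      exact fun he => hnm he.symm
    rw [List.foldl_cons]
    simp only [this, Bool.false_eq_true, if_false]
    exact ih (fun x hx => h x (by simp [hx]))

-- the counter loop over a list of copies of newName: appends "1" exactly once (or not at all)
theorem foldl_copies (newName : String) (l : List String)
    (h : ∀ x ∈ l, x = newName) :
    (l.foldl
      (fun st name =>
        if name == st.1 then (st.1 ++ PySem.Int.toStr st.2, st.2 + 1) else st)
      (newName, (1 : Int))).1 = if l = [] then newName else newName ++ "1" := by
  cases l with
  | nil => rfl
  | cons a t =>
    have ha : a = newName := h a (by simp)
    have h1 : PySem.Int.toStr 1 = "1" := by decide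
    have hne : newName ++ PySem.Int.toStr 1 ≠ newName := by
      rw [h1]; exact append_one_ne newName
    simp only [List.foldl, ha, beq_self_eq_true, if_true]
    rw [foldl_stuck newName t (fun x hx => h x (by simp [hx])) _ _ hne]
    simp [h1]

-- B computes: newName+"1" iff some existing name contains newName
theorem alt_char (existingNames : List String) (newName : String) :
    newMember_alt existingNames newName =
      if existingNames.any (fun n => PySem.Str.isIn newName n) then newName ++ "1"
      else newName := by
  induction existingNames with
  | nil => rfl
  | cons a t ih =>
    cases h : PySem.Str.isIn newName a with
    | true => simp only [newMember_alt, h, List.any_cons, Bool.true_or, if_true]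
    | false =>
      simp only [newMember_alt, h, List.any_cons, Bool.false_or, Bool.false_eq_true,
        if_false, ih]

-- ===== VERDICT (by name: the statement is the Claim_ definition above) =====
theorem newMember_spec : Claim_equal_newMember := by
  intro existingNames newName _
  unfold Spec_newMember newMember
  simp only [PySem.List.foldl_append_if, List.nil_append]
  set vs := (existingNames.filter (fun n => PySem.Str.isIn newName n)).map
      (fun _ => newName) with hvs
  have hall : ∀ x ∈ PySem.List.sorted vs (fun x => x) false, x = newName := by
    intro x hx
    rw [PySem.List.mem_sorted] at hx
    rcases List.mem_map.mp hx with ⟨_, _, h⟩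
    exact h.symm
  rw [foldl_copies newName _ hall, alt_char]
  have hlen : (PySem.List.sorted vs (fun x => x) false).length = vs.length :=
    PySem.List.length_sorted ..
  by_cases hany : existingNames.any (fun n => PySem.Str.isIn newName n)
  · have hne : PySem.List.sorted vs (fun x => x) false ≠ [] := by
      intro h
      have : vs.length = 0 := by rw [← hlen, h]; rfl
      have hv0 : vs = [] := List.length_eq_zero_iff.mp this
      rw [List.any_eq_true] at hany
      rcases hany with ⟨n, hn, hp⟩
      have hmem : n ∈ existingNames.filter (fun n => PySem.Str.isIn newName n) :=
        List.mem_filter.mpr ⟨hn, hp⟩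
      have : existingNames.filter (fun n => PySem.Str.isIn newName n) = [] := by
        simpa [hvs] using hv0
      rw [this] at hmem; exact absurd hmem (by simp)
    rw [if_neg hne, if_pos hany]
  · have hfil : existingNames.filter (fun n => PySem.Str.isIn newName n) = [] := by
      refine List.filter_eq_nil_iff.mpr (fun n hn hp => ?_)
      exact hany (List.any_eq_true.mpr ⟨n, hn, hp⟩)
    have hv0 : vs = [] := by rw [hvs, hfil]; rfl
    have hs : PySem.List.sorted vs (fun x => x) false = [] := by rw [hv0]; rfl
    rw [hs, if_pos rfl, if_neg hany]
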